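-- pv_equiv track=rewrite | github.com/KnowYourPivots/NBA-Hackathon-2017 | SkillsQuestion1/brute-force-aiyaz.py | non_LL_outcomes_given_x_Ws_and_y_Ls
-- ===== SOURCE A (Python) =====
-- def list_of_all_games_outcomes(n):
--     if n == 0:
--         return []
--     elif n == 1:
--         return ['L', 'W']
--     else:
--         ret = []
--         n_minus_one_list_outcomes = list_of_all_games_outcomes(n-1)
--         for outcome in n_minus_one_list_outcomes:
--             ret.append('L' + outcome)
--             ret.append('W' + outcome)
--         return ret
--
-- def non_LL_outcomes_given_x_Ws_and_y_Ls(x, y, n):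
--     list_of_outcomes = list_of_all_games_outcomes(n)
--     returned_sublist = []
--     for outcome in list_of_outcomes:
--         count_W = 0
--         count_L = 0
--         for letter in outcome:
--             if letter == 'L':
--                 count_L += 1
--             else:
--                 count_W += 1
--         if count_W == x and count_L == y and "LL" not in outcome:
--             returned_sublist.append(outcome)
--     return returned_sublist
-- ===== SOURCE B (Python) =====
-- def non_LL_outcomes_given_x_Ws_and_y_Ls(x, y, n):
--     # Level-by-level pruned expansion: grow suffixes front-ward, carrying their
--     # W/L counts; prune any suffix whose counts overflow x/y or that would form "LL".
--     if n <= 0: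
--         return []
--     states = [("", 0, 0)]  # (suffix, count_W, count_L)
--     for _ in range(n):
--         nxt = []
--         for s, w, l in states:
--             if l + 1 <= y and not s.startswith("L"):
--                 nxt.append(("L" + s, w, l + 1))
--             if w + 1 <= x:
--                 nxt.append(("W" + s, w + 1, l))
--         states = nxt
--     return [s for s, w, l in states if w == x and l == y]
-- ===== Notes on version B (the rewrite author's own statement) =====
-- stated objective: faster
-- what changed: Replaces generate-all-2^n-strings-then-filter (with a per-string counting loop) by a level-by-level pruned expansion that carries W/L counts with each partial suffix and discards any suffix that overflows the counts or would form "LL".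
import Mathlib
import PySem

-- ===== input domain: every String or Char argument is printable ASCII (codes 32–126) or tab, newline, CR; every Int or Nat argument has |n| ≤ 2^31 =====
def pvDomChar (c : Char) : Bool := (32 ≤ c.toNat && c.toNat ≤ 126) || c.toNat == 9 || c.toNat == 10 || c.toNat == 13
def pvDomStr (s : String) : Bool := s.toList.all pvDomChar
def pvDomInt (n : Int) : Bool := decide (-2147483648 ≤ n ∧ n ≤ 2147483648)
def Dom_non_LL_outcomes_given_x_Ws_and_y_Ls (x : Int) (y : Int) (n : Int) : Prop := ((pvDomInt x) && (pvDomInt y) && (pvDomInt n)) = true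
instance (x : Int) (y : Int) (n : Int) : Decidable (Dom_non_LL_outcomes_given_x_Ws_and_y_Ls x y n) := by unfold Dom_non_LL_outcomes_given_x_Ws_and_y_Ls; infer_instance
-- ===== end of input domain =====

-- B replaces A's generate-all-2^n-strings-then-filter by a level-by-level pruned
-- expansion carrying W/L counts with each partial suffix (objective: faster).
-- Strings are handled as List Char internally (PySem style); String.mk only at the output.

-- ===== PORT A =====
-- list_of_all_games_outcomes, on the character-list level; for n < 0 the Python
-- recursion never terminates (RecursionError), excluded by Pre_, so Int.toNat at the
-- call site is harmless there.
def pvLoago : Nat → List (List Char)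
  | 0 => []
  | 1 => [['L'], ['W']]
  | Nat.succ (Nat.succ m) =>
      (pvLoago (m + 1)).foldl (fun ret o => ret ++ [('L' :: o), ('W' :: o)]) []

def non_LL_outcomes_given_x_Ws_and_y_Ls (x : Int) (y : Int) (n : Int) : List String :=
  ((pvLoago n.toNat).foldl
    (fun sub outcome =>
      let c : Int × Int := outcome.foldl
        (fun (p : Int × Int) letter => if letter = 'L' then (p.1, p.2 + 1) else (p.1 + 1, p.2))
        (0, 0)
      if c.1 = x ∧ c.2 = y ∧ PySem.Chars.isIn ['L', 'L'] outcome = false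
      then sub ++ [outcome] else sub)
    []).map String.mk

-- ===== PORT B =====
-- one expansion level: each state is (suffix, count_W, count_L)
def pvAltStep (x y : Int) (states : List (List Char × Int × Int)) : List (List Char × Int × Int) :=
  states.foldl
    (fun nxt t =>
      nxt ++
        ((if t.2.2 + 1 ≤ y ∧ PySem.Chars.startswith t.1 ['L'] = false
          then [('L' :: t.1, t.2.1, t.2.2 + 1)] else []) ++
         (if t.2.1 + 1 ≤ x then [('W' :: t.1, t.2.1 + 1, t.2.2)] else [])))
    []

def non_LL_outcomes_given_x_Ws_and_y_Ls_alt (x : Int) (y : Int) (n : Int) : List String :=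
  if n ≤ 0 then []
  else
    ((((List.range n.toNat).foldl (fun st _ => pvAltStep x y st) [([], 0, 0)]).filter
        (fun t => decide (t.2.1 = x ∧ t.2.2 = y))).map fun t => String.mk t.1)

-- ===== PRECONDITION & SPEC =====
-- Pre_ excludes exactly n < 0, where A's recursion list_of_all_games_outcomes(n-1) never
-- reaches the base case and raises RecursionError.
def Pre_non_LL_outcomes_given_x_Ws_and_y_Ls (x : Int) (y : Int) (n : Int) : Prop := 0 ≤ n
instance (x : Int) (y : Int) (n : Int) : Decidable (Pre_non_LL_outcomes_given_x_Ws_and_y_Ls x y n) := by unfold Pre_non_LL_outcomes_given_x_Ws_and_y_Ls; infer_instance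
def pvWitness_non_LL_outcomes_given_x_Ws_and_y_Ls : Int × Int × Int := (1, 1, 2)

def Spec_non_LL_outcomes_given_x_Ws_and_y_Ls (x : Int) (y : Int) (n : Int) (out : List String) : Prop := out = non_LL_outcomes_given_x_Ws_and_y_Ls_alt x y n
instance (x : Int) (y : Int) (n : Int) (out : List String) : Decidable (Spec_non_LL_outcomes_given_x_Ws_and_y_Ls x y n out) := by unfold Spec_non_LL_outcomes_given_x_Ws_and_y_Ls; infer_instance

-- ===== CLAIM (what is proved, stated in full; the proofs are below) =====
def Claim_equal_non_LL_outcomes_given_x_Ws_and_y_Ls : Prop := ∀ (x : Int) (y : Int) (n : Int), Dom_non_LL_outcomes_given_x_Ws_and_y_Ls x y n → Pre_non_LL_outcomes_given_x_Ws_and_y_Ls x y n → Spec_non_LL_outcomes_given_x_Ws_and_y_Ls x y n (non_LL_outcomes_given_x_Ws_and_y_Ls x y n)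

-- ===== LEMMAS AND PROOFS =====

-- W / L counters
def pvCW : List Char → Int
  | [] => 0
  | c :: t => (if c = 'L' then 0 else 1) + pvCW t

def pvCL : List Char → Int
  | [] => 0
  | c :: t => (if c = 'L' then 1 else 0) + pvCL t

-- the idealized full outcome list (pvLoago without the special base case)
def pvGid : Nat → List (List Char)
  | 0 => [[]]
  | k + 1 => (pvGid k).flatMap (fun o => [('L' :: o), ('W' :: o)])

def pvGood (x y : Int) (o : List Char) : Bool :=
  decide (pvCW o ≤ x ∧ pvCL o ≤ y ∧ ¬ ['L', 'L'] <:+: o)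

def pvTup (o : List Char) : List Char × Int × Int := (o, pvCW o, pvCL o)

def pvChild (x y : Int) (t : List Char × Int × Int) : List (List Char × Int × Int) :=
  (if t.2.2 + 1 ≤ y ∧ PySem.Chars.startswith t.1 ['L'] = false
   then [('L' :: t.1, t.2.1, t.2.2 + 1)] else []) ++
  (if t.2.1 + 1 ≤ x then [('W' :: t.1, t.2.1 + 1, t.2.2)] else [])

def pvStates (x y : Int) (k : Nat) : List (List Char × Int × Int) :=
  (List.range k).foldl (fun st _ => pvAltStep x y st) [([], 0, 0)]

lemma pvCnt_foldl (o : List Char) (a b : Int) :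
    o.foldl (fun (p : Int × Int) letter => if letter = 'L' then (p.1, p.2 + 1) else (p.1 + 1, p.2)) (a, b)
      = (a + pvCW o, b + pvCL o) := by
  induction o generalizing a b with
  | nil => simp [pvCW, pvCL]
  | cons c t ih =>
      by_cases h : c = 'L' <;> simp [List.foldl_cons, h, ih, pvCW, pvCL] <;> omega

lemma pvCW_nonneg (o : List Char) : 0 ≤ pvCW o := by
  induction o with
  | nil => simp [pvCW]
  | cons c t ih => simp only [pvCW]; split <;> omega

lemma pvCL_nonneg (o : List Char) : 0 ≤ pvCL o := by
  induction o with
  | nil => simp [pvCL]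
  | cons c t ih => simp only [pvCL]; split <;> omega

lemma pvLL_infix_cons (c : Char) (o : List Char) :
    (['L', 'L'] <:+: c :: o) ↔ (c = 'L' ∧ ['L'] <+: o) ∨ ['L', 'L'] <:+: o := by
  rw [List.infix_cons_iff, List.cons_prefix_cons]
  constructor
  · rintro (⟨h1, h2⟩ | h) <;> [exact Or.inl ⟨h1.symm, h2⟩; exact Or.inr h]
  · rintro (⟨h1, h2⟩ | h) <;> [exact Or.inl ⟨h1.symm, h2⟩; exact Or.inr h]

lemma pvStartswith_false_iff (o : List Char) :
    PySem.Chars.startswith o ['L'] = false ↔ ¬ ['L'] <+: o := by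
  rw [← PySem.Chars.startswith_iff]
  simp

lemma pvLoago_succ (k : Nat) : pvLoago (k + 1) = pvGid (k + 1) := by
  induction k with
  | zero => rfl
  | succ m ih =>
      show (pvLoago (m + 1)).foldl (fun ret o => ret ++ [('L' :: o), ('W' :: o)]) [] = _
      rw [ih, PySem.List.foldl_append_eq_flatMap (fun o => [('L' :: o), ('W' :: o)])]
      rfl

lemma pvAltStep_eq (x y : Int) (st : List (List Char × Int × Int)) :
    pvAltStep x y st = st.flatMap (pvChild x y) := by
  unfold pvAltStep pvChild
  exact PySem.List.foldl_append_eq_flatMap _ _ _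

lemma pvFlatMap_filter {α β : Type} (p : α → Bool) (f : α → List β) (l : List α) :
    (l.filter p).flatMap f = l.flatMap (fun a => if p a then f a else []) := by
  induction l with
  | nil => rfl
  | cons a t ih =>
      by_cases h : p a <;> simp [List.filter_cons, h, ih]

lemma pvStates_succ (x y : Int) (k : Nat) :
    pvStates x y (k + 1) = pvAltStep x y (pvStates x y k) := by
  unfold pvStates
  rw [List.range_succ, List.foldl_append]
  rfl

-- per-element step of the invariant
lemma pvKey (x y : Int) (o : List Char) :
    (if pvGood x y o then pvChild x y (pvTup o) else [])
      = ([('L' :: o), ('W' :: o)].filter (pvGood x y)).map pvTup := by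
  have hcwL : pvCW ('L' :: o) = pvCW o := by simp [pvCW]
  have hclL : pvCL ('L' :: o) = 1 + pvCL o := by simp [pvCL]
  have hcwW : pvCW ('W' :: o) = 1 + pvCW o := by simp [pvCW]
  have hclW : pvCL ('W' :: o) = pvCL o := by simp [pvCL]
  have hLLW : (['L', 'L'] <:+: 'W' :: o) ↔ ['L', 'L'] <:+: o := by
    rw [pvLL_infix_cons]; simp
  by_cases hg : pvCW o ≤ x ∧ pvCL o ≤ y ∧ ¬ ['L', 'L'] <:+: o
  · obtain ⟨hw, hl, hnoLL⟩ := hg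
    rw [if_pos (by simp [pvGood]; exact ⟨hw, hl, hnoLL⟩)]
    have hnoLLL : (¬ ['L', 'L'] <:+: ('L' :: o)) ↔ (¬ ['L'] <+: o) := by
      rw [pvLL_infix_cons]
      constructor
      · intro h hp; exact h (Or.inl ⟨rfl, hp⟩)
      · rintro h (⟨_, hp⟩ | hi) <;> [exact h hp; exact hnoLL hi]
    have hgL : (pvGood x y ('L' :: o) = true)
        ↔ (pvCL o + 1 ≤ y ∧ PySem.Chars.startswith o ['L'] = false) := by
      simp only [pvGood, decide_eq_true_eq, hcwL, hclL]
      constructor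
      · rintro ⟨_, h2, h3⟩
        exact ⟨by omega, (pvStartswith_false_iff o).mpr (hnoLLL.mp h3)⟩
      · rintro ⟨h2, h3⟩
        exact ⟨hw, by omega, hnoLLL.mpr ((pvStartswith_false_iff o).mp h3)⟩
    have hgW : (pvGood x y ('W' :: o) = true) ↔ (pvCW o + 1 ≤ x) := by
      simp only [pvGood, decide_eq_true_eq, hcwW, hclW, hLLW]
      constructor
      · rintro ⟨h1, _, _⟩; omega
      · intro h; exact ⟨by omega, hl, hnoLL⟩
    have htL : pvTup ('L' :: o) = ('L' :: o, pvCW o, pvCL o + 1) := by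
      simp [pvTup, hcwL, hclL]; omega
    have htW : pvTup ('W' :: o) = ('W' :: o, pvCW o + 1, pvCL o) := by
      simp [pvTup, hcwW, hclW]; omega
    show pvChild x y (pvTup o) = _
    unfold pvChild
    simp only [pvTup]
    have bL : pvGood x y ('L' :: o)
        = decide (pvCL o + 1 ≤ y ∧ PySem.Chars.startswith o ['L'] = false) := by
      by_cases c : pvCL o + 1 ≤ y ∧ PySem.Chars.startswith o ['L'] = false
      · simp only [c, decide_true]; exact hgL.mpr c
      · simp only [c, decide_false]; exact Bool.eq_false_iff.mpr (fun h => c (hgL.mp h))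
    have bW : pvGood x y ('W' :: o) = decide (pvCW o + 1 ≤ x) := by
      by_cases c : pvCW o + 1 ≤ x
      · simp only [c, decide_true]; exact hgW.mpr c
      · simp only [c, decide_false]; exact Bool.eq_false_iff.mpr (fun h => c (hgW.mp h))
    rw [List.filter_cons, List.filter_cons, List.filter_nil, bL, bW]
    by_cases c1 : pvCL o < y ∧ PySem.Chars.startswith o ['L'] = false <;>
      by_cases c2 : pvCW o + 1 ≤ x <;>
        simp [c1, c2, htL, htW]
  · rw [if_neg (by simp [pvGood]; intro h1 h2; by_contra h3; exact hg ⟨h1, h2, by simpa using h3⟩)]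
    have hbadL : pvGood x y ('L' :: o) = false := by
      simp only [pvGood, decide_eq_false_iff_not, hcwL, hclL, pvLL_infix_cons]
      rintro ⟨h1, h2, h3⟩
      exact hg ⟨h1, by omega, fun h => h3 (Or.inr h)⟩
    have hbadW : pvGood x y ('W' :: o) = false := by
      simp only [pvGood, decide_eq_false_iff_not, hcwW, hclW, hLLW]
      rintro ⟨h1, h2, h3⟩
      exact hg ⟨by omega, h2, h3⟩
    simp [List.filter_cons, hbadL, hbadW]

lemma pvInvariant (x y : Int) (hx : 0 ≤ x) (hy : 0 ≤ y) (k : Nat) :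
    pvStates x y k = ((pvGid k).filter (pvGood x y)).map pvTup := by
  induction k with
  | zero =>
      have hgood : pvGood x y [] = true := by
        simp [pvGood, pvCW, pvCL, hx, hy]
      simp [pvStates, pvGid, List.filter_cons, hgood, pvTup, pvCW, pvCL]
  | succ k ih =>
      rw [pvStates_succ, ih, pvAltStep_eq, List.flatMap_map, pvFlatMap_filter]
      show _ = (((pvGid k).flatMap (fun o => [('L' :: o), ('W' :: o)])).filter
        (pvGood x y)).map pvTup
      rw [List.filter_flatMap, List.map_flatMap]
      exact List.flatMap_congr (fun o _ => pvKey x y o)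

lemma pvStates_nonneg (x y : Int) (k : Nat) :
    ∀ t ∈ pvStates x y k, 0 ≤ t.2.1 ∧ 0 ≤ t.2.2 := by
  induction k with
  | zero => intro t ht; simp [pvStates] at ht; simp [ht]
  | succ k ih =>
      intro t ht
      rw [pvStates_succ, pvAltStep_eq, List.mem_flatMap] at ht
      obtain ⟨s, hs, hts⟩ := ht
      have hsn := ih s hs
      unfold pvChild at hts
      rw [List.mem_append] at hts
      rcases hts with h | h <;> (split at h <;> simp at h) <;> simp [h] <;> omega

-- characterize A as filter-then-map
lemma pvA_eq (x y n : Int) :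
    non_LL_outcomes_given_x_Ws_and_y_Ls x y n
      = ((pvLoago n.toNat).filter
          (fun o => decide (pvCW o = x ∧ pvCL o = y ∧ ¬ ['L', 'L'] <:+: o))).map String.mk := by
  unfold non_LL_outcomes_given_x_Ws_and_y_Ls
  refine congrArg (List.map String.mk) ?_
  have h := PySem.List.foldl_append_ite_eq_filter
    (p := fun o : List Char =>
      (o.foldl (fun (p : Int × Int) letter =>
        if letter = 'L' then (p.1, p.2 + 1) else (p.1 + 1, p.2)) (0, 0)).1 = x ∧
      (o.foldl (fun (p : Int × Int) letter =>
        if letter = 'L' then (p.1, p.2 + 1) else (p.1 + 1, p.2)) (0, 0)).2 = y ∧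
      PySem.Chars.isIn ['L', 'L'] o = false)
    (l := pvLoago n.toNat) (acc := [])
  refine h.trans ?_
  rw [List.nil_append]
  refine List.filter_congr (fun o _ => ?_)
  rw [pvCnt_foldl o 0 0, decide_eq_decide]
  simp [PySem.Chars.isIn_eq_false_iff]

-- ===== VERDICT (by name: the statement is the Claim_ definition above) =====
theorem non_LL_outcomes_given_x_Ws_and_y_Ls_spec : Claim_equal_non_LL_outcomes_given_x_Ws_and_y_Ls := by
  intro x y n _ hpre
  unfold Pre_non_LL_outcomes_given_x_Ws_and_y_Ls at hpre
  unfold Spec_non_LL_outcomes_given_x_Ws_and_y_Ls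
  rcases eq_or_lt_of_le hpre with h0 | hpos
  · rw [← h0]; rfl
  · obtain ⟨k, hk⟩ : ∃ k, n.toNat = k + 1 := ⟨n.toNat - 1, by omega⟩
    unfold non_LL_outcomes_given_x_Ws_and_y_Ls_alt
    rw [if_neg (by omega)]
    rw [pvA_eq]
    show _ = ((pvStates x y n.toNat).filter
      (fun t => decide (t.2.1 = x ∧ t.2.2 = y))).map fun t => String.mk t.1
    by_cases hxy : 0 ≤ x ∧ 0 ≤ y
    · rw [pvInvariant x y hxy.1 hxy.2, hk, pvLoago_succ k, List.filter_map,
        List.map_map, List.filter_filter]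
      have hcomp : ((fun t : List Char × Int × Int => String.mk t.1) ∘ pvTup)
          = String.mk := rfl
      rw [hcomp]
      refine congrArg (List.map String.mk) ?_
      refine (List.filter_congr (fun o _ => ?_)).symm
      show (decide ((pvTup o).2.1 = x ∧ (pvTup o).2.2 = y) && pvGood x y o) = _
      have : (pvTup o).2.1 = pvCW o ∧ (pvTup o).2.2 = pvCL o := ⟨rfl, rfl⟩
      rw [this.1, this.2]
      unfold pvGood
      rw [← Bool.decide_and, decide_eq_decide]
      constructor
      · rintro ⟨⟨h1, h2⟩, _, _, h3⟩
        exact ⟨h1, h2, h3⟩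
      · rintro ⟨h1, h2, h3⟩
        exact ⟨⟨h1, h2⟩, le_of_eq h1, le_of_eq h2, h3⟩
    · have hA : ((pvLoago n.toNat).filter
          (fun o => decide (pvCW o = x ∧ pvCL o = y ∧ ¬ ['L', 'L'] <:+: o))) = [] := by
        refine List.filter_eq_nil_iff.mpr (fun o _ => ?_)
        have := pvCW_nonneg o
        have := pvCL_nonneg o
        simp only [decide_eq_true_eq]
        rintro ⟨e1, e2, _⟩
        omega
      have hB : ((pvStates x y n.toNat).filter
          (fun t => decide (t.2.1 = x ∧ t.2.2 = y))) = [] := by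
        refine List.filter_eq_nil_iff.mpr (fun t ht => ?_)
        have := pvStates_nonneg x y n.toNat t ht
        simp only [decide_eq_true_eq]
        rintro ⟨e1, e2⟩
        omega
      rw [hA, hB]
      rfl
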